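-- pv_equiv track=rewrite | github.com/omnirevolve/omnirevolve-image-processor | image_processor/14_preview_stream.py | _palette_args
-- ===== SOURCE A (Python) =====
-- from typing import Tuple, List
--
-- def _palette_args(bgr_list: List[Tuple[int,int,int]]) -> List[str]:
--     # Previewer expects RGB; cfg.colors are BGR. Clamp to 4 entries.
--     args: List[str] = []
--     for i in range(min(4, len(bgr_list))):
--         b, g, r = bgr_list[i]
--         args += [f"--c{i}", f"{int(r)},{int(g)},{int(b)}"]
--     # Fill missing with defaults if fewer than 4 colors present
--     defaults = [(255,0,0),(0,255,0),(0,0,255),(0,0,0)]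
--     for i in range(len(bgr_list), 4):
--         r,g,b = defaults[i]
--         args += [f"--c{i}", f"{r},{g},{b}"]
--     return args
-- ===== SOURCE B (Python) =====
-- def _palette_args(bgr_list):
--     # Recursive co-traversal: walk the (clamped) provided colors and the default
--     # table in lockstep, building the argument list back-to-front by prepending.
--     def go(colors, defaults, i):
--         if i == 4:
--             return []
--         if colors:
--             b, g, r = colors[0]
--             rgb = (int(r), int(g), int(b))
--             rest = go(colors[1:], defaults[1:], i + 1)
--         else:
--             rgb = defaults[0]
--             rest = go(colors, defaults[1:], i + 1)
--         r, g, b = rgb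
--         return ["--c%d" % i, "%d,%d,%d" % (r, g, b)] + rest
--     return go(bgr_list[:4], [(255, 0, 0), (0, 255, 0), (0, 0, 255), (0, 0, 0)], 0)
-- ===== Notes on version B (the rewrite author's own statement) =====
-- stated objective: alternative
-- what changed: B replaces A's two imperative append loops by a single recursive co-traversal of the clamped color list and the default table in lockstep, constructing the argument list back-to-front by prepending instead of accumulating with +=.
import Mathlib
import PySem

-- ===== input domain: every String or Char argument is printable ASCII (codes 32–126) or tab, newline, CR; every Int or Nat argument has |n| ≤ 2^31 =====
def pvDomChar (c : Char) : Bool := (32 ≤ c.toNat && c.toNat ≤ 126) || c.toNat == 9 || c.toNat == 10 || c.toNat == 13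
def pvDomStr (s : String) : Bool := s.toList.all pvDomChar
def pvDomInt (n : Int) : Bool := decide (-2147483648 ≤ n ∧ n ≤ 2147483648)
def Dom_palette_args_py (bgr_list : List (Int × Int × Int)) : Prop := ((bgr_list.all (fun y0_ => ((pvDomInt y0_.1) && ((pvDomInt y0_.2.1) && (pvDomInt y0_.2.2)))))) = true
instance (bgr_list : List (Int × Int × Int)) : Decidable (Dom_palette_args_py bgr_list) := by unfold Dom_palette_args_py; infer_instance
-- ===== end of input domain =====

-- B replaces A's two append loops by one recursive lockstep walk over the clamped
-- colors and the default table, building the list back-to-front; objective: alternative decomposition, same cost.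

-- ===== PORT A =====
-- Port of A: two loops — range(min(4,len)) over the provided BGR colors, then range(len,4)
-- over the defaults.  Indexing is always in range, so getD (with an unused dummy default) is exact.
def palette_args_py (bgr_list : List (Int × Int × Int)) : List String :=
  let args : List String :=
    (List.range (min 4 bgr_list.length)).foldl (fun args i =>
      let t := bgr_list.getD i (0, 0, 0)
      args ++ ["--c" ++ PySem.Int.toStr (i : Int),
               PySem.Int.toStr t.2.2 ++ "," ++ PySem.Int.toStr t.2.1 ++ "," ++ PySem.Int.toStr t.1]) []
  let defaults : List (Int × Int × Int) := [(255, 0, 0), (0, 255, 0), (0, 0, 255), (0, 0, 0)]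
  (PySem.List.pyRange (bgr_list.length : Int) 4 1).foldl (fun args i =>
    let t := defaults.getD i.toNat (0, 0, 0)
    args ++ ["--c" ++ PySem.Int.toStr i,
             PySem.Int.toStr t.1 ++ "," ++ PySem.Int.toStr t.2.1 ++ "," ++ PySem.Int.toStr t.2.2]) args

-- ===== PORT B =====
-- Port of B's helper `go`: recursion in lockstep on colors and defaults; structural on
-- defaults.  The `_, [] => []` arm is unreachable from the top-level call (there
-- defaults always has length 4 - i, so i = 4 fires first).
def pvGoB : List (Int × Int × Int) → List (Int × Int × Int) → Nat → List String
  | colors, defaults, i =>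
    if i = 4 then []
    else
      match colors, defaults with
      | (b, g, r) :: cs, _ :: ds =>
          ["--c" ++ PySem.Int.toStr (i : Int),
           PySem.Int.toStr r ++ "," ++ PySem.Int.toStr g ++ "," ++ PySem.Int.toStr b]
            ++ pvGoB cs ds (i + 1)
      | [], d :: ds =>
          ["--c" ++ PySem.Int.toStr (i : Int),
           PySem.Int.toStr d.1 ++ "," ++ PySem.Int.toStr d.2.1 ++ "," ++ PySem.Int.toStr d.2.2]
            ++ pvGoB [] ds (i + 1)
      | _, [] => []

-- bgr_list[:4] is List.take 4 (exact for a nonnegative literal upper bound)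
def palette_args_py_alt (bgr_list : List (Int × Int × Int)) : List String :=
  pvGoB (bgr_list.take 4) [(255, 0, 0), (0, 255, 0), (0, 0, 255), (0, 0, 0)] 0

-- ===== PRECONDITION & SPEC =====
def Spec_palette_args_py (bgr_list : List (Int × Int × Int)) (out : List String) : Prop := out = palette_args_py_alt bgr_list
instance (bgr_list : List (Int × Int × Int)) (out : List String) : Decidable (Spec_palette_args_py bgr_list out) := by unfold Spec_palette_args_py; infer_instance

-- ===== CLAIM (what is proved, stated in full; the proofs are below) =====
def Claim_equal_palette_args_py : Prop := ∀ (bgr_list : List (Int × Int × Int)), Dom_palette_args_py bgr_list → Spec_palette_args_py bgr_list (palette_args_py bgr_list)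

-- ===== LEMMAS AND PROOFS =====

-- ===== VERDICT (by name: the statement is the Claim_ definition above) =====
theorem palette_args_py_spec : Claim_equal_palette_args_py := by
  intro bgr_list _
  unfold Spec_palette_args_py
  match bgr_list with
  | [] =>
    simp [palette_args_py, palette_args_py_alt, pvGoB, PySem.List.pyRange, List.range_succ]
  | [a] =>
    simp [palette_args_py, palette_args_py_alt, pvGoB, PySem.List.pyRange, List.range_succ]
  | [a, b] =>
    simp [palette_args_py, palette_args_py_alt, pvGoB, PySem.List.pyRange, List.range_succ]
  | [a, b, c] =>
    simp [palette_args_py, palette_args_py_alt, pvGoB, PySem.List.pyRange, List.range_succ]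
  | a :: b :: c :: d :: rest =>
    have hmin : min 4 (a :: b :: c :: d :: rest).length = 4 := by simp
    have hrange : PySem.List.pyRange ((a :: b :: c :: d :: rest).length : Int) 4 1 = [] := by
      exact PySem.List.pyRange_one_eq_nil (by simp; omega)
    simp only [palette_args_py, palette_args_py_alt, hmin, hrange]
    simp [pvGoB, List.range_succ]
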